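-- pv_equiv track=rewrite | github.com/pka69/Portfolio | 05 histogram.py | histogram_vert
-- ===== SOURCE A (Python) =====
-- def histogram_vert(Data):
--     hor = len(Data)
--     try:
--         vert = max(Data)
--     except:
--         return
--     out=''
--     for i in range(vert,0,-1):
--         for j in range(hor):
--             if Data[j]>=i:
--                 out +=" #"
--             else:
--                 out +="  "
--         out +='\n'
--     return out
-- ===== SOURCE B (Python) =====
-- def histogram_vert(Data):
--     try:
--         vert = max(Data)
--     except ValueError:
--         return None
--     # build each column top-down as a list of 2-char cells, then transpose
--     cols = [['  '] * (vert - max(0, x)) + [' #'] * max(0, x) for x in Data]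
--     return ''.join(''.join(col[k] for col in cols) + '\n' for k in range(vert))
-- ===== Notes on version B (the rewrite author's own statement) =====
-- stated objective: alternative
-- what changed: B builds each bar as a complete vertical column of 2-char cells (blanks then hashes, computed from the clamped height max(0,x)) and produces the output by a transpose pass joining the k-th cell of every column per row, instead of A's row-outer/column-inner per-cell comparison loop.
import Mathlib
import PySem

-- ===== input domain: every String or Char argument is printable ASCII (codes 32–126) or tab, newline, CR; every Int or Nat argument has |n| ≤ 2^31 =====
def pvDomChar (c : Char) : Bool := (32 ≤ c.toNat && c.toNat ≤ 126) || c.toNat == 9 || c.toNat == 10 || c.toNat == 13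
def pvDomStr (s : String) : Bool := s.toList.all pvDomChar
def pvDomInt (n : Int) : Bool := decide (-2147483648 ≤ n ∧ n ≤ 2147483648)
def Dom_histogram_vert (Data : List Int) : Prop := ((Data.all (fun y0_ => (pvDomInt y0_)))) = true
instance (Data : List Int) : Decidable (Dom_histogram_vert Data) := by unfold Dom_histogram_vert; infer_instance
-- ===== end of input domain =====

-- B builds the picture column-first (each bar as a vertical list of 2-char cells) and emits the
-- rows by a transpose pass, instead of A's row-outer/column-inner per-cell scan; objective: alternative decomposition.

-- ===== PORT A =====
def histogram_vert (Data : List Int) : Option String :=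
  let hor : Int := Data.length
  match PySem.List.max? Data (fun y => y) with
  | none => none
  | some vert =>
    let out : String :=
      (PySem.List.pyRange vert 0 (-1)).foldl (fun out i =>
        ((PySem.List.pyRange 0 hor 1).foldl (fun out j =>
          -- Data[j]: j is always in range here, so pyGetD with default 0 is exact
          if PySem.List.pyGetD Data j 0 ≥ i then out ++ " #" else out ++ "  ") out)
        ++ "\n") ""
    some out

-- ===== PORT B =====
def histogram_vert_alt (Data : List Int) : Option String :=
  match PySem.List.max? Data (fun y => y) with
  | none => none
  | some vert =>
    let cols : List (List String) := Data.map (fun x =>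
      List.replicate (vert - max 0 x).toNat "  " ++ List.replicate (max 0 x).toNat " #")
    -- col[k]: k < vert is always in range (every column has length vert), so getD "" is exact
    some (PySem.Str.join "" ((List.range vert.toNat).map (fun k =>
      PySem.Str.join "" (cols.map (fun col => col.getD k "")) ++ "\n")))

-- ===== PRECONDITION & SPEC =====
def Spec_histogram_vert (Data : List Int) (out : Option String) : Prop := out = histogram_vert_alt Data
instance (Data : List Int) (out : Option String) : Decidable (Spec_histogram_vert Data out) := by unfold Spec_histogram_vert; infer_instance

-- ===== CLAIM (what is proved, stated in full; the proofs are below) =====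
def Claim_equal_histogram_vert : Prop := ∀ (Data : List Int), Dom_histogram_vert Data → Spec_histogram_vert Data (histogram_vert Data)

-- ===== LEMMAS AND PROOFS =====

-- the two-character cell of row i for value x, as a list of chars
def pvCell (i x : Int) : List Char := if i ≤ x then [' ', '#'] else [' ', ' ']

lemma pv_join_nil_flatten (l : List (List Char)) : PySem.Chars.join [] l = l.flatten := by
  induction l with
  | nil => simp [PySem.Chars.join_nil]
  | cons h t ih =>
    cases t with
    | nil => simp [PySem.Chars.join_singleton]
    | cons h2 t2 => simp [PySem.Chars.join_cons_cons] at ih ⊢; simpa using ih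

lemma pv_inner (i : Int) (Data : List Int) (out : String) :
    (Data.foldl (fun out x => if x ≥ i then out ++ " #" else out ++ "  ") out).toList
      = out.toList ++ Data.flatMap (pvCell i) := by
  induction Data generalizing out with
  | nil => simp
  | cons x t ih =>
    simp only [List.foldl_cons, List.flatMap_cons, ih, pvCell, ge_iff_le]
    split <;> simp [String.toList_append]

lemma pv_outer (l : List Int) (Data : List Int) (out : String) :
    (l.foldl (fun out i =>
        (Data.foldl (fun out x => if x ≥ i then out ++ " #" else out ++ "  ") out) ++ "\n") out).toList
      = out.toList ++ (l.map (fun i => Data.flatMap (pvCell i) ++ ['\n'])).flatten := by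
  induction l generalizing out with
  | nil => simp
  | cons i t ih =>
    simp only [List.foldl_cons, List.map_cons, List.flatten_cons, ih, String.toList_append, pv_inner]
    simp only [show ("\n".toList : List Char) = ['\n'] from rfl, List.append_assoc]

lemma pv_cell_getD (vert x : Int) (k : Nat) (hx : x ≤ vert) (hk : k < vert.toNat) :
    (List.replicate (vert - max 0 x).toNat "  " ++ List.replicate (max 0 x).toNat " #").getD k ""
      = if vert - (k : Int) ≤ x then " #" else "  " := by
  by_cases hcase : k < (vert - max 0 x).toNat
  · rw [List.getD_append _ _ _ _ (by simpa using hcase), List.getD_replicate _ hcase]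
    have : ¬ vert - (k : Int) ≤ x := by omega
    simp [this]
  · rw [List.getD_append_right _ _ _ _ (by simpa using not_lt.mp hcase)]
    have hlt : k - (vert - max 0 x).toNat < (max 0 x).toNat := by omega
    rw [List.length_replicate, List.getD_replicate _ hlt]
    have : vert - (k : Int) ≤ x := by omega
    simp [this]

lemma pv_alt_toList (Data : List Int) (vert : Int)
    (hmax : ∀ y ∈ Data, y ≤ vert) :
    (PySem.Str.join "" ((List.range vert.toNat).map (fun k =>
        PySem.Str.join "" ((Data.map (fun x =>
          List.replicate (vert - max 0 x).toNat "  " ++ List.replicate (max 0 x).toNat " #")).map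
            (fun col => col.getD k "")) ++ "\n"))).toList
      = ((List.range vert.toNat).map (fun (k : Nat) =>
          Data.flatMap (pvCell (vert - (k : Int))) ++ ['\n'])).flatten := by
  rw [PySem.Str.toList_join]
  rw [show ("".toList : List Char) = [] from rfl, pv_join_nil_flatten, List.map_map]
  congr 1
  apply List.map_congr_left
  intro k hk
  rw [List.mem_range] at hk
  simp only [Function.comp, String.toList_append, PySem.Str.toList_join]
  rw [show ("".toList : List Char) = [] from rfl, pv_join_nil_flatten, List.map_map, List.map_map]
  congr 1
  rw [List.flatMap_def]
  congr 1
  apply List.map_congr_left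
  intro x hx
  simp only [Function.comp]
  rw [pv_cell_getD vert x k (hmax x hx) hk]
  unfold pvCell
  split <;> rfl

-- ===== VERDICT (by name: the statement is the Claim_ definition above) =====
theorem histogram_vert_spec : Claim_equal_histogram_vert := by
  intro Data _
  unfold Spec_histogram_vert histogram_vert histogram_vert_alt
  cases hm : PySem.List.max? Data (fun y => y) with
  | none => rfl
  | some vert =>
    simp only
    congr 1
    apply String.ext
    rw [pv_alt_toList Data vert (fun y hy => PySem.List.max?_isMax hm y hy)]
    have hfun : (fun (out : String) (i : Int) =>
        ((PySem.List.pyRange 0 ((Data.length : Int)) 1).foldl (fun out j =>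
          if PySem.List.pyGetD Data j 0 ≥ i then out ++ " #" else out ++ "  ") out) ++ "\n")
      = (fun (out : String) (i : Int) =>
        (Data.foldl (fun out x => if x ≥ i then out ++ " #" else out ++ "  ") out) ++ "\n") := by
      funext out i
      rw [show PySem.List.pyRange 0 ((Data.length : Int)) 1
            = PySem.List.pyRange 0 ((Data.length : Int)) from rfl]
      rw [PySem.List.foldl_pyRange_zero_pyGetD' Data 0
        (fun out x => if x ≥ i then out ++ " #" else out ++ "  ") out]
    rw [hfun, PySem.List.pyRange_neg_one, show (vert - 0 : Int) = vert from by ring]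
    rw [pv_outer ((List.range vert.toNat).map (fun (k : Nat) => vert - (k : Int))) Data ""]
    rw [List.map_map]
    simp only [Function.comp_def, show ("".toList : List Char) = [] from rfl, List.nil_append]
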